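-- pv_equiv track=rewrite | github.com/elie5555/tactile2force | tactile2force/preprocessing/preprocessing_functions.py | format_topic_name
-- ===== SOURCE A (Python) =====
-- def format_topic_name(name):
--     '''
--     This function replaces '/' in a string either by '-' or removes it if it is the first character
--
--     Arg:
--         name (string): string to be formatted
--
--     Returns:
--         string: formatted string
--     '''
--
--     x = [i for i, ltr in enumerate(name) if ltr == '/']
--     list_name = list(name)
--     remove_first = False
--     for id in x:
--         if id:
--             list_name[id] = '-'
--         else:
--             remove_first = True
--     if remove_first:
--         list_name.pop(0)
--     return "".join(list_name)
-- ===== SOURCE B (Python) =====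
-- def format_topic_name(name):
--     if name.startswith('/'):
--         return name[1:].replace('/', '-')
--     return name.replace('/', '-')
-- ===== Notes on version B (the rewrite author's own statement) =====
-- stated objective: simpler
-- what changed: A collects slash indices with enumerate, mutates a char list in place and pops the head; B is a single startswith guard plus a slice and one str.replace, with no index bookkeeping or list mutation.
import Mathlib
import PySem

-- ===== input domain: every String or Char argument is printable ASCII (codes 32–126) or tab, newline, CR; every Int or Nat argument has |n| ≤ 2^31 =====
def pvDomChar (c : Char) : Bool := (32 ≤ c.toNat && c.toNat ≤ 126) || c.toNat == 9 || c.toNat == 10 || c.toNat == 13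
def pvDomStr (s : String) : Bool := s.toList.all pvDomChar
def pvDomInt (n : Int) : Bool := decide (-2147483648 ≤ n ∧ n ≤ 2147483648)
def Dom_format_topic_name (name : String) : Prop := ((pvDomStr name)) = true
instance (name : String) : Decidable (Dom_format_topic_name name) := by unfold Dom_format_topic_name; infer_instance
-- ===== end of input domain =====

-- B replaces A's index collection + in-place char-list mutation + pop with a startswith guard, a slice and one replace (objective: simpler).
-- ===== PORT A =====
def format_topic_name (name : String) : String :=
  -- x = [i for i, ltr in enumerate(name) if ltr == '/']
  let x : List Int :=
    (PySem.List.enumerate name.toList).filterMap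
      (fun p => if p.2 = '/' then some p.1 else none)
  -- list_name = list(name); remove_first = False; for id in x: …
  -- (enumerate indices are nonnegative, so `id.toNat` for list_name[id] is exact)
  let st : List Char × Bool :=
    x.foldl
      (fun st id =>
        if id ≠ 0 then (st.1.set id.toNat '-', st.2) else (st.1, true))
      (name.toList, false)
  -- if remove_first: list_name.pop(0)   (0 ∈ x forces the list nonempty, so pop(0) = tail, exact)
  let list_name := if st.2 then st.1.drop 1 else st.1
  String.ofList list_name

-- ===== PORT B =====
def format_topic_name_alt (name : String) : String :=
  if PySem.Str.startswith name "/" then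
    PySem.Str.replace (PySem.Str.slice name (some 1) none) "/" "-"
  else
    PySem.Str.replace name "/" "-"

-- ===== PRECONDITION & SPEC =====
def Spec_format_topic_name (name : String) (out : String) : Prop := out = format_topic_name_alt name
instance (name : String) (out : String) : Decidable (Spec_format_topic_name name out) := by unfold Spec_format_topic_name; infer_instance

-- ===== CLAIM (what is proved, stated in full; the proofs are below) =====
def Claim_equal_format_topic_name : Prop := ∀ (name : String), Dom_format_topic_name name → Spec_format_topic_name name (format_topic_name name)

-- ===== LEMMAS AND PROOFS =====


-- per-character replacement: what replace "/" "-" does on a single-char pattern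
def pvRepl (c : Char) : Char := if c = '/' then '-' else c

theorem pv_go_single (t : List Char) : ∀ (fuel : Nat) (acc : List Char),
    t.length ≤ fuel →
    PySem.Chars.replace.go ['/'] ['-'] fuel t acc = acc.reverse ++ t.map pvRepl := by
  induction t with
  | nil =>
    intro fuel acc _
    cases fuel <;> simp [PySem.Chars.replace.go]
  | cons c t ih =>
    intro fuel acc hle
    cases fuel with
    | zero => simp at hle
    | succ fuel =>
      by_cases hc : c = '/'
      · subst hc
        rw [PySem.Chars.replace.go]
        simp only [List.isPrefixOf, BEq.rfl, Bool.true_and, if_true]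
        show PySem.Chars.replace.go ['/'] ['-'] fuel (List.drop 1 ('/' :: t)) _ = _
        rw [List.drop_one, List.tail_cons, ih fuel _ (by simpa using hle)]
        simp [pvRepl]
      · rw [PySem.Chars.replace.go]
        have : (['/'].isPrefixOf (c :: t)) = false := by
          simpa [List.isPrefixOf] using fun h => hc h.symm
        rw [this]
        simp only [Bool.false_eq_true, if_false]
        rw [ih fuel _ (by simpa using Nat.le_of_succ_le_succ hle)]
        simp [pvRepl, hc]

theorem pv_replace_single (s : List Char) :
    PySem.Chars.replace s ['/'] ['-'] = s.map pvRepl := by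
  have h := pv_go_single s s.length [] (le_refl _)
  simpa [PySem.Chars.replace] using h

-- the list-update half of A's loop
def pvG (l : List Char) (id : Int) : List Char :=
  if id ≠ 0 then l.set id.toNat '-' else l

theorem pv_fold_pair (x : List Int) : ∀ (l : List Char) (b : Bool),
    x.foldl (fun st id => if id ≠ 0 then (st.1.set id.toNat '-', st.2) else (st.1, true)) (l, b)
      = (x.foldl pvG l, b || decide ((0 : Int) ∈ x)) := by
  induction x with
  | nil => intro l b; simp
  | cons i x ih =>
    intro l b
    by_cases hi : i = 0
    · subst hi
      simp only [List.foldl_cons, ne_eq, not_true_eq_false, if_false, List.mem_cons, true_or]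
      rw [ih]
      simp [pvG]
    · simp only [List.foldl_cons, if_pos hi, List.mem_cons]
      rw [ih]
      simp [pvG, hi, Ne.symm hi]

theorem pv_fold_length (x : List Int) : ∀ (l : List Char),
    (x.foldl pvG l).length = l.length := by
  induction x with
  | nil => intro l; simp
  | cons i x ih => intro l; rw [List.foldl_cons, ih]; simp [pvG]; split <;> simp

theorem pv_fold_getElem (x : List Int) (hx : ∀ i ∈ x, 0 ≤ i) :
    ∀ (l : List Char) (j : Nat) (hj : j < (x.foldl pvG l).length),
    (x.foldl pvG l)[j] =
      if (j : Int) ∈ x ∧ j ≠ 0 then '-' else l[j]'(by rwa [pv_fold_length] at hj) := by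
  induction x with
  | nil => intro l j hj; simp
  | cons i x ih =>
    intro l j hj
    have hx' : ∀ i ∈ x, 0 ≤ i := fun i hi => hx i (List.mem_cons_of_mem _ hi)
    have hi0 : 0 ≤ i := hx i List.mem_cons_self
    have hj' : j < (List.foldl pvG (pvG l i) x).length := by
      simpa [List.foldl_cons] using hj
    have key : (List.foldl pvG l (i :: x))[j]'hj = (List.foldl pvG (pvG l i) x)[j]'hj' := rfl
    rw [key, ih hx' (pvG l i) j hj']
    by_cases hji : (j : Int) = i
    · by_cases hj0 : j = 0
      · subst hj0
        have : i = 0 := by omega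
        subst this
        simp [pvG]
      · have hi : i ≠ 0 := by omega
        have hji' : i.toNat = j := by omega
        unfold pvG
        simp [hi, List.mem_cons, ← hji, hj0]
    · by_cases hm : (j : Int) ∈ x ∧ j ≠ 0
      · have hm' : (j : Int) ∈ i :: x ∧ j ≠ 0 := ⟨List.mem_cons_of_mem _ hm.1, hm.2⟩
        rw [if_pos hm, if_pos hm']
      · have hm' : ¬ ((j : Int) ∈ i :: x ∧ j ≠ 0) := by
          rintro ⟨h1, h2⟩
          rcases List.mem_cons.mp h1 with h | h
          · exact hji h
          · exact hm ⟨h, h2⟩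
        rw [if_neg hm, if_neg hm']
        unfold pvG
        split
        · rw [List.getElem_set]
          have : ¬ i.toNat = j := by omega
          simp [this]
        · rfl

-- membership in A's index list
theorem pv_mem_x (l : List Char) (j : Nat) (hj : j < l.length) :
    ((j : Int) ∈ (PySem.List.enumerate l).filterMap
        (fun p => if p.2 = '/' then some p.1 else none)) ↔ l[j] = '/' := by
  rw [List.mem_filterMap]
  constructor
  · rintro ⟨⟨i, c⟩, hm, he⟩
    rw [PySem.List.mem_enumerate_iff] at hm
    obtain ⟨k, hk, hp⟩ := hm
    cases hp
    by_cases hc : l[k] = '/'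
    · have : k = j := by simp [hc] at he; omega
      subst this
      exact hc
    · simp [hc] at he
  · intro h
    refine ⟨((j : Int), '/'), ?_, by simp⟩
    rw [PySem.List.mem_enumerate_iff]
    exact ⟨j, hj, by simp [h]⟩

-- A's slash indices are nonnegative
theorem pv_x_nonneg (l : List Char) :
    ∀ i ∈ (PySem.List.enumerate l).filterMap
        (fun p => if p.2 = '/' then some p.1 else none), 0 ≤ i := by
  intro i hi
  rw [List.mem_filterMap] at hi
  obtain ⟨⟨a, c⟩, hm, he⟩ := hi
  rw [PySem.List.mem_enumerate_iff] at hm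
  obtain ⟨k, hk, hp⟩ := hm
  cases hp
  by_cases hc : l[k] = '/'
  · simp [hc] at he; omega
  · simp [hc] at he

-- what A's loop does to the char list: keep the head, pvRepl the tail
theorem pv_A_fold (c : Char) (t : List Char) :
    List.foldl pvG (c :: t)
      ((PySem.List.enumerate (c :: t)).filterMap (fun p => if p.2 = '/' then some p.1 else none))
    = c :: t.map pvRepl := by
  have hxpos := pv_x_nonneg (c :: t)
  apply List.ext_getElem (by simp [pv_fold_length])
  intro j h1 h2
  rw [pv_fold_getElem _ hxpos (c :: t) j h1]
  cases j with
  | zero => simp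
  | succ k =>
    have hk : k < t.length := by
      have := h1; rw [pv_fold_length] at this; simpa using this
    have hmem := pv_mem_x (c :: t) (k + 1) (by simpa using Nat.succ_lt_succ hk)
    by_cases hc : t[k] = '/'
    · rw [if_pos ⟨hmem.mpr (by simpa using hc), by omega⟩]
      simp [pvRepl, hc]
    · rw [if_neg (by rintro ⟨h, -⟩; exact hc (by simpa using hmem.mp h))]
      simp [pvRepl, hc]

-- whether A removes the head: 0 is a slash index iff the string starts with '/'
theorem pv_zero_mem (c : Char) (t : List Char) :
    ((0 : Int) ∈ (PySem.List.enumerate (c :: t)).filterMap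
        (fun p => if p.2 = '/' then some p.1 else none)) ↔ c = '/' := by
  have h := pv_mem_x (c :: t) 0 (Nat.succ_pos _)
  simp only [Nat.cast_zero, List.getElem_cons_zero] at h
  exact h

-- ===== VERDICT (by name: the statement is the Claim_ definition above) =====
theorem format_topic_name_spec : Claim_equal_format_topic_name := by
  intro name _
  unfold Spec_format_topic_name
  apply String.toList_inj.mp
  simp only [format_topic_name, format_topic_name_alt]
  rw [pv_fold_pair, apply_ite String.toList,
    PySem.Str.toList_replace, PySem.Str.toList_replace, PySem.Str.toList_slice,
    PySem.Chars.slice_eq_listSlice, PySem.List.slice_from_one, PySem.Str.startswith_eq,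
    String.toList_ofList]
  have hslash : ("/" : String).toList = ['/'] := by decide
  rw [hslash]
  have hdash : ("-" : String).toList = ['-'] := by decide
  rw [hdash, pv_replace_single, pv_replace_single]
  cases hl : name.toList with
  | nil => simp [PySem.List.enumerate, PySem.Chars.startswith]
  | cons c t =>
    rw [pv_A_fold]
    by_cases hc : c = '/'
    · have h0 : ((0 : Int) ∈ (PySem.List.enumerate (c :: t)).filterMap
          (fun p => if p.2 = '/' then some p.1 else none)) := (pv_zero_mem c t).mpr hc
      rw [if_pos (by simpa using h0)]
      have : PySem.Chars.startswith (c :: t) ['/'] = true := by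
        simp [PySem.Chars.startswith, List.isPrefixOf, hc]
      rw [if_pos this]
      simp
    · have h0 : ¬ ((0 : Int) ∈ (PySem.List.enumerate (c :: t)).filterMap
          (fun p => if p.2 = '/' then some p.1 else none)) := fun h => hc ((pv_zero_mem c t).mp h)
      rw [if_neg (by simpa using h0)]
      have : PySem.Chars.startswith (c :: t) ['/'] = false := by
        simp [PySem.Chars.startswith, List.isPrefixOf]
        exact fun h => hc h.symm
      rw [if_neg (by simp [this])]
      simp [pvRepl, hc]
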